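-- pv_equiv track=rewrite | github.com/LCDSP-webpage/lcdsp_code | language_control/single_player/natural_language_to_style.py | acc_check_en
-- ===== SOURCE A (Python) =====
-- def acc_check_en(nl_result, param):
--     result = True
--     param = param.split(',')
--     instruction_type = 'shot' if param[2].strip(" ") == 'Shoot' else 'move'
--     if "Horizontal Position" in nl_result or "Vertical Position" in nl_result and instruction_type == "move":
--         move_instruction_keys = ['Horizontal Position', 'Vertical Position', 'Movement Action']
--         if not all(element in nl_result.keys() for element in move_instruction_keys):
--             return False
--         move, area_x, area_y = param[0], param[1].strip(" "), param[2].strip(" ")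
--         if area_x != '' and nl_result['Horizontal Position'] != [area_x]:
--             result = False
--         if area_y != '' and nl_result['Vertical Position'] != [area_y]:
--             result = False
--         if move != '' and nl_result['Movement Action'] != [move]:
--             result = False
--         return result
--     elif "Shooting Action" in nl_result and instruction_type == "shot":
--         shot_instruction_keys = ['Shooting Position', 'Movement Action', 'Shooting Action']
--         if not all(element in nl_result.keys() for element in shot_instruction_keys):
--             return False
--         move, shot_pos, shot_act = param[0], param[1].strip(" "), param[2].strip(" ")
--         if shot_pos != '' and nl_result['Shooting Position'] != [shot_pos]:
--             result = False
--         if move != '' and nl_result['Movement Action'] != [move]: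
--             result = False
--         if shot_act != '' and nl_result['Shooting Action'] != [shot_act]:
--             result = False
--         return result
--     else:
--         return False
-- ===== SOURCE B (Python) =====
-- def acc_check_en(nl_result, param):
--     parts = param.split(',')
--     move, p1, p2 = parts[0], parts[1].strip(' '), parts[2].strip(' ')
--     is_shot = (p2 == 'Shoot')
--     if 'Horizontal Position' in nl_result or ('Vertical Position' in nl_result and not is_shot):
--         expected = {'Horizontal Position': p1, 'Vertical Position': p2, 'Movement Action': move}
--     elif 'Shooting Action' in nl_result and is_shot:
--         expected = {'Shooting Position': p1, 'Movement Action': move, 'Shooting Action': p2}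
--     else:
--         return False
--     missing = len(expected)
--     ok = True
--     for key, value in nl_result.items():
--         if key in expected:
--             missing -= 1
--             exp = expected[key]
--             if exp != '' and value != [exp]:
--                 ok = False
--     return missing == 0 and ok
-- ===== Notes on version B (the rewrite author's own statement) =====
-- stated objective: alternative
-- what changed: A tests membership and looks up each of the three required keys individually; B instead builds the branch's expected-values dict and makes ONE pass over nl_result's items with a missing-required-keys counter and a mismatch flag, so the per-key membership tests and lookups disappear.
import Mathlib
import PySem

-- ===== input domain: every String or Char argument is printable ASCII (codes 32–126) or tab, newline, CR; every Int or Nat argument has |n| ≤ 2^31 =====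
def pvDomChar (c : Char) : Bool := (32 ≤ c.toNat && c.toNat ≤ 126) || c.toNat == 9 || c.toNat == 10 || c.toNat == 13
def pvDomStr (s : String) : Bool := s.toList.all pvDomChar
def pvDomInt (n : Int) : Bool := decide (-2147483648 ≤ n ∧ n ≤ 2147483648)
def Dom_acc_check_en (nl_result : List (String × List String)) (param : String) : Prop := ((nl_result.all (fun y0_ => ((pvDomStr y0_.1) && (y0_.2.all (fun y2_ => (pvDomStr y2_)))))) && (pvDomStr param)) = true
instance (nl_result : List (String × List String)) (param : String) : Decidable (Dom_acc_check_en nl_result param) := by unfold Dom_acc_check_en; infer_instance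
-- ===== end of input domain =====

-- B replaces A's per-key membership tests and lookups by one pass over the dict's items
-- against an expected-values dict, with a missing-key counter; objective: alternative.

-- ===== PORT A =====
-- literal transliteration of A; the `or`/`and` precedence of the first guard is kept
def acc_check_en (nl_result : List (String × List String)) (param : String) : Bool :=
  let d := PySem.Dict.ofList nl_result
  let result := true
  let p := (PySem.Str.split? param ",").getD []   -- sep "," ≠ "", so getD never fires
  let instruction_type :=
    if PySem.Str.stripChars ((PySem.List.pyGet? p 2).getD "") " " == "Shoot" then "shot" else "move"
  if d.contains "Horizontal Position" || (d.contains "Vertical Position" && instruction_type == "move") then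
    if !(["Horizontal Position", "Vertical Position", "Movement Action"].all (fun e => d.contains e)) then
      false
    else
      let move := (PySem.List.pyGet? p 0).getD ""
      let area_x := PySem.Str.stripChars ((PySem.List.pyGet? p 1).getD "") " "
      let area_y := PySem.Str.stripChars ((PySem.List.pyGet? p 2).getD "") " "
      let result := if area_x != "" && d.getD "Horizontal Position" [] != [area_x] then false else result
      let result := if area_y != "" && d.getD "Vertical Position" [] != [area_y] then false else result
      let result := if move != "" && d.getD "Movement Action" [] != [move] then false else result
      result
  else if d.contains "Shooting Action" && instruction_type == "shot" then
    if !(["Shooting Position", "Movement Action", "Shooting Action"].all (fun e => d.contains e)) then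
      false
    else
      let move := (PySem.List.pyGet? p 0).getD ""
      let shot_pos := PySem.Str.stripChars ((PySem.List.pyGet? p 1).getD "") " "
      let shot_act := PySem.Str.stripChars ((PySem.List.pyGet? p 2).getD "") " "
      let result := if shot_pos != "" && d.getD "Shooting Position" [] != [shot_pos] then false else result
      let result := if move != "" && d.getD "Movement Action" [] != [move] then false else result
      let result := if shot_act != "" && d.getD "Shooting Action" [] != [shot_act] then false else result
      result
  else
    false

-- ===== PORT B =====
-- literal transliteration of Source B: pick the expected dict for the branch, then ONE pass
-- over nl_result's items with a missing-required-keys counter and a mismatch flag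
def acc_check_en_alt (nl_result : List (String × List String)) (param : String) : Bool :=
  let d := PySem.Dict.ofList nl_result
  let parts := (PySem.Str.split? param ",").getD []   -- sep "," ≠ "", so getD never fires
  let move := (PySem.List.pyGet? parts 0).getD ""
  let p1 := PySem.Str.stripChars ((PySem.List.pyGet? parts 1).getD "") " "
  let p2 := PySem.Str.stripChars ((PySem.List.pyGet? parts 2).getD "") " "
  let is_shot := p2 == "Shoot"
  let expected? : Option (PySem.Dict String String) :=
    if d.contains "Horizontal Position" || (d.contains "Vertical Position" && !is_shot) then
      some (PySem.Dict.mk [("Horizontal Position", p1), ("Vertical Position", p2), ("Movement Action", move)])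
    else if d.contains "Shooting Action" && is_shot then
      some (PySem.Dict.mk [("Shooting Position", p1), ("Movement Action", move), ("Shooting Action", p2)])
    else none
  match expected? with
  | none => false
  | some expected =>
    let st := d.items.foldl (fun (acc : Int × Bool) kv =>
        if expected.contains kv.1 then
          let exp := expected.getD kv.1 ""
          (acc.1 - 1, acc.2 && !(exp != "" && kv.2 != [exp]))
        else acc)
      ((expected.size : Int), true)
    decide (st.1 = 0) && st.2

-- ===== PRECONDITION & SPEC =====
-- Pre_ excludes params with fewer than two commas, where A's `param[2]` raises IndexError (B raises there too).
def Pre_acc_check_en (nl_result : List (String × List String)) (param : String) : Prop :=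
  2 ≤ PySem.Str.count param ","
instance (nl_result : List (String × List String)) (param : String) : Decidable (Pre_acc_check_en nl_result param) := by unfold Pre_acc_check_en; infer_instance
def pvWitness_acc_check_en : (List (String × List String)) × String :=
  ([("Horizontal Position", ["left"]), ("Vertical Position", ["up"]), ("Movement Action", ["run"])], "run,left,up")

def Spec_acc_check_en (nl_result : List (String × List String)) (param : String) (out : Bool) : Prop := out = acc_check_en_alt nl_result param
instance (nl_result : List (String × List String)) (param : String) (out : Bool) : Decidable (Spec_acc_check_en nl_result param out) := by unfold Spec_acc_check_en; infer_instance

-- ===== CLAIM (what is proved, stated in full; the proofs are below) =====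
def Claim_equal_acc_check_en : Prop := ∀ (nl_result : List (String × List String)) (param : String), Dom_acc_check_en nl_result param → Pre_acc_check_en nl_result param → Spec_acc_check_en nl_result param (acc_check_en nl_result param)

-- ===== LEMMAS AND PROOFS =====

-- the fold of B, split into its missing-counter and flag components
theorem pvFold {α : Type} (e : PySem.Dict String String) (key : α → String) (val : α → List String)
    (l : List α) (a : Int) (b : Bool) :
    l.foldl (fun (acc : Int × Bool) kv =>
        if e.contains (key kv) then
          (acc.1 - 1, acc.2 && !(e.getD (key kv) "" != "" && val kv != [e.getD (key kv) ""]))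
        else acc) (a, b)
    = (a - l.countP (fun kv => e.contains (key kv)),
       b && l.all (fun kv => !(e.contains (key kv)) || !(e.getD (key kv) "" != "" && val kv != [e.getD (key kv) ""]))) := by
  induction l generalizing a b with
  | nil => simp
  | cons kv t ih =>
    rw [List.foldl_cons]
    by_cases h : e.contains (key kv) = true
    · rw [if_pos h, ih]
      refine Prod.ext ?_ ?_
      · simp only [List.countP_cons, h, if_true]; push_cast; omega
      · simp [List.all_cons, h, Bool.and_assoc]
    · rw [if_neg h, ih]
      refine Prod.ext ?_ ?_
      · simp [List.countP_cons, h]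
      · simp [List.all_cons, h]

-- countP of membership in three distinct keys over a Nodup list
theorem pvCnt (k1 k2 k3 : String) (h12 : k1 ≠ k2) (h13 : k1 ≠ k3) (h23 : k2 ≠ k3)
    (ks : List String) (hnd : ks.Nodup) :
    ks.countP (fun k => k1 == k || (k2 == k || (k3 == k || false)))
    = (if k1 ∈ ks then 1 else 0) + ((if k2 ∈ ks then 1 else 0) + (if k3 ∈ ks then 1 else 0)) := by
  induction ks with
  | nil => simp
  | cons a t ih =>
    rw [List.nodup_cons] at hnd
    obtain ⟨ha, ht⟩ := hnd
    rw [List.countP_cons, ih ht]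
    by_cases e1 : a = k1
    · subst e1
      have n1 : ¬ (a ∈ t) := ha
      have n2 : ¬ (k2 = a) := fun h => h12 h.symm
      have n3 : ¬ (k3 = a) := fun h => h13 h.symm
      simp only [List.mem_cons, n1, n2, n3, or_false, false_or, eq_self_iff_true, if_true,
        BEq.refl, Bool.true_or, if_false]
      simp [n1, n2, n3]
      omega
    · by_cases e2 : a = k2
      · subst e2
        have n1 : ¬ (k1 = a) := h12
        have n2 : ¬ (a ∈ t) := ha
        have n3 : ¬ (k3 = a) := fun h => h23 h.symm
        simp [List.mem_cons, n1, n2, n3]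
        omega
      · by_cases e3 : a = k3
        · subst e3
          have n1 : ¬ (k1 = a) := h13
          have n2 : ¬ (k2 = a) := h23
          have n3 : ¬ (a ∈ t) := ha
          simp [List.mem_cons, n1, n2, n3]
          omega
        · have n1 : ¬ (k1 = a) := fun h => e1 h.symm
          have n2 : ¬ (k2 = a) := fun h => e2 h.symm
          have n3 : ¬ (k3 = a) := fun h => e3 h.symm
          simp [List.mem_cons, n1, n2, n3]

-- the all-pass over keys with a predicate trivial outside three points
theorem pvAll (p : String → Bool) (k1 k2 k3 : String) (h12 : k1 ≠ k2) (h13 : k1 ≠ k3) (h23 : k2 ≠ k3)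
    (ks : List String)
    (hp : ∀ k, k ≠ k1 → k ≠ k2 → k ≠ k3 → p k = true) :
    ks.all p = ((!(decide (k1 ∈ ks)) || p k1) && ((!(decide (k2 ∈ ks)) || p k2) && (!(decide (k3 ∈ ks)) || p k3))) := by
  induction ks with
  | nil => simp
  | cons a t ih =>
    rw [List.all_cons, ih]
    by_cases e1 : a = k1
    · subst e1
      have n2 : ¬ (k2 = a) := fun h => h12 h.symm
      have n3 : ¬ (k3 = a) := fun h => h13 h.symm
      cases hpa : p a <;>
        simp [List.mem_cons, n2, n3, hpa, Bool.and_assoc, Bool.and_comm, Bool.and_left_comm]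
    · by_cases e2 : a = k2
      · subst e2
        have n1 : ¬ (k1 = a) := h12
        have n3 : ¬ (k3 = a) := fun h => h23 h.symm
        cases hpa : p a <;>
          simp [List.mem_cons, n1, n3, hpa, Bool.and_assoc, Bool.and_comm, Bool.and_left_comm]
      · by_cases e3 : a = k3
        · subst e3
          have n1 : ¬ (k1 = a) := h13
          have n2 : ¬ (k2 = a) := h23
          cases hpa : p a <;>
            simp [List.mem_cons, n1, n2, hpa, Bool.and_assoc, Bool.and_comm, Bool.and_left_comm]
        · have n1 : ¬ (k1 = a) := fun h => e1 h.symm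
          have n2 : ¬ (k2 = a) := fun h => e2 h.symm
          have n3 : ¬ (k3 = a) := fun h => e3 h.symm
          simp [List.mem_cons, n1, n2, n3, hp a e1 e2 e3]

-- one branch of the comparison, for three distinct required keys and expected values
theorem pvCore (d : PySem.Dict String (List String)) (hnd : d.keys.Nodup)
    (k1 k2 k3 : String) (h12 : k1 ≠ k2) (h13 : k1 ≠ k3) (h23 : k2 ≠ k3)
    (v1 v2 v3 : String) :
    (let e : PySem.Dict String String := PySem.Dict.mk [(k1, v1), (k2, v2), (k3, v3)]
     let st := d.items.foldl (fun (acc : Int × Bool) kv =>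
        if e.contains kv.1 then
          (acc.1 - 1, acc.2 && !(e.getD kv.1 "" != "" && kv.2 != [e.getD kv.1 ""]))
        else acc) ((e.size : Int), true)
     decide (st.1 = 0) && st.2)
    = (if !(d.contains k1 && (d.contains k2 && (d.contains k3 && true))) then false
       else
         if v3 != "" && d.getD k3 [] != [v3] then false
         else if v2 != "" && d.getD k2 [] != [v2] then false
         else if v1 != "" && d.getD k1 [] != [v1] then false
         else true) := by
  have hc : ∀ k, (PySem.Dict.mk [(k1, v1), (k2, v2), (k3, v3)]).contains k
      = (k1 == k || (k2 == k || (k3 == k || false))) := by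
    intro k
    simp [PySem.Dict.contains_mk]
  have hg1 : (PySem.Dict.mk [(k1, v1), (k2, v2), (k3, v3)]).getD k1 "" = v1 := by
    simp [PySem.Dict.getD_eq_get?_getD, PySem.Dict.get?_mk_cons]
  have hg2 : (PySem.Dict.mk [(k1, v1), (k2, v2), (k3, v3)]).getD k2 "" = v2 := by
    simp [PySem.Dict.getD_eq_get?_getD, PySem.Dict.get?_mk_cons, h12]
  have hg3 : (PySem.Dict.mk [(k1, v1), (k2, v2), (k3, v3)]).getD k3 "" = v3 := by
    simp [PySem.Dict.getD_eq_get?_getD, PySem.Dict.get?_mk_cons, h13, h23]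
  simp only []
  rw [pvFold _ Prod.fst Prod.snd]
  rw [PySem.Dict.items_eq_map_keys d hnd ([] : List String)]
  rw [List.countP_map, List.all_map]
  rw [pvAll _ k1 k2 k3 h12 h13 h23 _
      (by
        intro k n1 n2 n3
        have w1 : ¬ (k1 = k) := fun h => n1 h.symm
        have w2 : ¬ (k2 = k) := fun h => n2 h.symm
        have w3 : ¬ (k3 = k) := fun h => n3 h.symm
        have : (PySem.Dict.mk [(k1, v1), (k2, v2), (k3, v3)]).contains k = false := by
          rw [hc]
          simp [w1, w2, w3]
        simp [Function.comp, this])]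
  have hcnt : (List.countP ((fun kv => (PySem.Dict.mk [(k1, v1), (k2, v2), (k3, v3)]).contains kv.1) ∘
      (fun k => (k, d.getD k []))) d.keys : Int)
      = ((if k1 ∈ d.keys then 1 else 0) + ((if k2 ∈ d.keys then 1 else 0) + (if k3 ∈ d.keys then 1 else 0)) : Nat) := by
    rw [show (List.countP ((fun kv => (PySem.Dict.mk [(k1, v1), (k2, v2), (k3, v3)]).contains kv.1) ∘
        (fun k => (k, d.getD k []))) d.keys)
      = List.countP (fun k => k1 == k || (k2 == k || (k3 == k || false))) d.keys from by
        apply List.countP_congr; intro k _; simp [Function.comp, hc]]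
    rw [pvCnt k1 k2 k3 h12 h13 h23 d.keys hnd]
  rw [hcnt]
  have hm1 := PySem.Dict.contains_eq_decide_mem_keys d k1
  have hm2 := PySem.Dict.contains_eq_decide_mem_keys d k2
  have hm3 := PySem.Dict.contains_eq_decide_mem_keys d k3
  have hsz : ((PySem.Dict.mk [(k1, v1), (k2, v2), (k3, v3)]).size : Int) = 3 := by rfl
  rw [hsz, hm1, hm2, hm3]
  by_cases m1 : k1 ∈ d.keys <;> by_cases m2 : k2 ∈ d.keys <;> by_cases m3 : k3 ∈ d.keys <;>
    simp only [m1, m2, m3, if_true, if_false, decide_true, decide_false, Function.comp,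
      hc, hg1, hg2, hg3, BEq.refl, Bool.true_or, Bool.or_true, Bool.true_and, Bool.and_true,
      Bool.not_true, Bool.not_false, Bool.false_or, Bool.or_false, Bool.false_and, Bool.and_false] <;>
    norm_num [bne] <;>
    simp [Bool.beq_eq_decide_eq, Bool.or_comm, Bool.and_comm, Bool.and_left_comm, Bool.and_assoc]

-- ===== VERDICT (by name: the statement is the Claim_ definition above) =====
theorem acc_check_en_spec : Claim_equal_acc_check_en := by
  intro nl param hdom hpre
  unfold Spec_acc_check_en acc_check_en acc_check_en_alt
  simp only []
  set d := PySem.Dict.ofList nl with hd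
  set p := (PySem.Str.split? param ",").getD [] with hpp
  set mv := (PySem.List.pyGet? p 0).getD "" with hmv
  set x1 := PySem.Str.stripChars ((PySem.List.pyGet? p 1).getD "") " " with hx1
  set x2 := PySem.Str.stripChars ((PySem.List.pyGet? p 2).getD "") " " with hx2
  have hnd : d.keys.Nodup := PySem.Dict.nodup_keys_ofList nl
  have hmove : ((if x2 == "Shoot" then "shot" else "move") == "move") = !(x2 == "Shoot") := by
    cases h : (x2 == "Shoot") <;> simp [h]
  have hshot : ((if x2 == "Shoot" then "shot" else "move") == "shot") = (x2 == "Shoot") := by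
    cases h : (x2 == "Shoot") <;> simp [h]
  rw [hmove, hshot]
  by_cases g1 : (d.contains "Horizontal Position" || (d.contains "Vertical Position" && !(x2 == "Shoot"))) = true
  · rw [if_pos g1, if_pos g1]
    have hcore := pvCore d hnd "Horizontal Position" "Vertical Position" "Movement Action"
      (by decide) (by decide) (by decide) x1 x2 mv
    simp only [] at hcore
    simp only [List.all_cons, List.all_nil]
    exact hcore.symm
  · rw [if_neg g1, if_neg g1]
    by_cases g2 : (d.contains "Shooting Action" && (x2 == "Shoot")) = true
    · rw [if_pos g2, if_pos g2]
      have hcore := pvCore d hnd "Shooting Position" "Movement Action" "Shooting Action"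
        (by decide) (by decide) (by decide) x1 mv x2
      simp only [] at hcore
      simp only [List.all_cons, List.all_nil]
      exact hcore.symm
    · rw [if_neg g2, if_neg g2]
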